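-- pv_equiv track=rewrite | github.com/ceumicrodata/adatmesterseg | assignment/5/typoglicemia.py | convert_text_to_list
-- ===== SOURCE A (Python) =====
-- DOUBLE = ('cs', 'dz', 'gy', 'ly', 'ny', 'sz', 'ty', 'zs')
--
-- TRIPLE = ('dzs',)
--
-- def convert_text_to_list(text):
--     if text == '':
--         return []
--     if text[0:3] in TRIPLE:
--         return [text[0:3]] + convert_text_to_list(text[3:])
--     if text[0:2] in DOUBLE:
--         return [text[0:2]] + convert_text_to_list(text[2:])
--     else:
--         return [text[0]] + convert_text_to_list(text[1:])
-- ===== SOURCE B (Python) =====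
-- DOUBLE = ('cs', 'dz', 'gy', 'ly', 'ny', 'sz', 'ty', 'zs')
--
-- TRIPLE = ('dzs',)
--
-- def convert_text_to_list(text):
--     tokens = []
--     i = 0
--     n = len(text)
--     while i < n:
--         if text[i:i + 3] == 'dzs':
--             tokens.append('dzs')
--             i += 3
--         elif text[i:i + 2] in DOUBLE:
--             tokens.append(text[i:i + 2])
--             i += 2
--         else:
--             tokens.append(text[i])
--             i += 1
--     return tokens
-- ===== Notes on version B (the rewrite author's own statement) =====
-- stated objective: faster
-- what changed: Replaced A's non-tail recursion that re-slices the whole remaining suffix at every token with a single forward index-based loop that appends tokens to an accumulator and never copies the tail.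
import Mathlib
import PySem

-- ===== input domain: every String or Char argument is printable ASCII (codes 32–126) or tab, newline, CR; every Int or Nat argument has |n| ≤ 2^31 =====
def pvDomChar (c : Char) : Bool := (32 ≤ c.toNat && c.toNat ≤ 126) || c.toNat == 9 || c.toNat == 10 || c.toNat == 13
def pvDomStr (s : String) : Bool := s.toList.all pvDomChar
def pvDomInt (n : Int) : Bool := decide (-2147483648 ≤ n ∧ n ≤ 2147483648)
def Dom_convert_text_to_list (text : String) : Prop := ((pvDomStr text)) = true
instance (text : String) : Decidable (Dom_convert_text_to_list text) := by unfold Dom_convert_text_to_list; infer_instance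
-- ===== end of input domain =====

-- B replaces A's recursion, which slices off the whole remaining suffix at every token,
-- by a single forward index-based loop appending tokens to an accumulator.

def pvDOUBLE : List (List Char) :=
  [['c','s'], ['d','z'], ['g','y'], ['l','y'], ['n','y'], ['s','z'], ['t','y'], ['z','s']]

def pvTRIPLE : List (List Char) := [['d','z','s']]

-- ===== PORT A =====
-- A's recursion, on the code-point list of the string (tokens rebuilt as Strings).
def pvConvA : List Char → List String
  | [] => []
  | c :: rest =>
    if PySem.List.slice (c :: rest) (some 0) (some 3) ∈ pvTRIPLE then
      String.ofList (PySem.List.slice (c :: rest) (some 0) (some 3))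
        :: pvConvA (PySem.List.slice (c :: rest) (some 3) none)
    else if PySem.List.slice (c :: rest) (some 0) (some 2) ∈ pvDOUBLE then
      String.ofList (PySem.List.slice (c :: rest) (some 0) (some 2))
        :: pvConvA (PySem.List.slice (c :: rest) (some 2) none)
    else
      String.ofList [c] :: pvConvA (PySem.List.slice (c :: rest) (some 1) none)
  termination_by s => s.length
  decreasing_by
  · simp [PySem.List.slice_from _ (show (0:Int) ≤ 3 by norm_num)]
  · simp [PySem.List.slice_from _ (show (0:Int) ≤ 2 by norm_num)]
  · simp [PySem.List.slice_from _ (show (0:Int) ≤ 1 by norm_num)]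

def convert_text_to_list (text : String) : List String := pvConvA text.toList

-- ===== PORT B =====
-- B's while-loop: cursor i, token accumulator, only O(1)-size slices.
def pvLoopB (s : List Char) (i : Nat) (tokens : List String) : List String :=
  if h : i < s.length then
    if PySem.List.slice s (some (i : Int)) (some ((i + 3 : Nat) : Int)) = ['d','z','s'] then
      pvLoopB s (i + 3) (tokens ++ ["dzs"])
    else if PySem.List.slice s (some (i : Int)) (some ((i + 2 : Nat) : Int)) ∈ pvDOUBLE then
      pvLoopB s (i + 2)
        (tokens ++ [String.ofList (PySem.List.slice s (some (i : Int)) (some ((i + 2 : Nat) : Int)))])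
    else
      pvLoopB s (i + 1) (tokens ++ [String.ofList [s[i]'h]])
  else tokens
  termination_by s.length - i

def convert_text_to_list_alt (text : String) : List String := pvLoopB text.toList 0 []

-- ===== PRECONDITION & SPEC =====
def Spec_convert_text_to_list (text : String) (out : List String) : Prop := out = convert_text_to_list_alt text
instance (text : String) (out : List String) : Decidable (Spec_convert_text_to_list text out) := by unfold Spec_convert_text_to_list; infer_instance

-- ===== CLAIM (what is proved, stated in full; the proofs are below) =====
def Claim_equal_convert_text_to_list : Prop := ∀ (text : String), Dom_convert_text_to_list text → Spec_convert_text_to_list text (convert_text_to_list text)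

-- ===== LEMMAS AND PROOFS =====

-- A's step, with the slices evaluated to take/drop.
lemma pvConvA_eq (t : List Char) : pvConvA t =
    if t = [] then []
    else if t.take 3 = ['d','z','s'] then
      String.ofList (t.take 3) :: pvConvA (t.drop 3)
    else if t.take 2 ∈ pvDOUBLE then
      String.ofList (t.take 2) :: pvConvA (t.drop 2)
    else
      String.ofList (t.take 1) :: pvConvA (t.drop 1) := by
  cases t with
  | nil => simp [pvConvA]
  | cons c rest =>
    rw [pvConvA]
    simp only [PySem.List.slice_zero_start]
    rw [PySem.List.slice_to _ (show (0:Int) ≤ 3 by norm_num),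
        PySem.List.slice_to _ (show (0:Int) ≤ 2 by norm_num),
        PySem.List.slice_from _ (show (0:Int) ≤ 3 by norm_num),
        PySem.List.slice_from _ (show (0:Int) ≤ 2 by norm_num),
        PySem.List.slice_from _ (show (0:Int) ≤ 1 by norm_num)]
    simp [pvTRIPLE]

-- Loop invariant: the loop with cursor i and accumulator `tokens` returns `tokens`
-- followed by A's tokenization of the remaining suffix.
lemma pvLoopB_eq (s : List Char) (i : Nat) (tokens : List String) :
    pvLoopB s i tokens = tokens ++ pvConvA (s.drop i) := by
  fun_induction pvLoopB s i tokens with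
  | case1 i tokens h h3 ih =>
    rw [ih]
    rw [PySem.List.slice_natCast] at h3
    have e3 : i + 3 - i = 3 := by omega
    rw [e3] at h3
    have hne : s.drop i ≠ [] := by simp only [ne_eq, List.drop_eq_nil_iff]; omega
    rw [pvConvA_eq (s.drop i)]
    have hdzs : String.ofList ['d','z','s'] = "dzs" := by decide
    simp [hne, h3, hdzs, List.drop_drop]
  | case2 i tokens h h3 h2 ih =>
    rw [ih]
    rw [PySem.List.slice_natCast] at h3 h2
    have e3 : i + 3 - i = 3 := by omega
    have e2 : i + 2 - i = 2 := by omega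
    rw [e3] at h3; rw [e2] at h2
    have hne : s.drop i ≠ [] := by simp only [ne_eq, List.drop_eq_nil_iff]; omega
    rw [pvConvA_eq (s.drop i)]
    rw [PySem.List.slice_natCast, e2]
    simp [hne, h3, h2, List.drop_drop]
  | case3 i tokens h h3 h2 ih =>
    rw [ih]
    rw [PySem.List.slice_natCast] at h3 h2
    have e3 : i + 3 - i = 3 := by omega
    have e2 : i + 2 - i = 2 := by omega
    rw [e3] at h3; rw [e2] at h2
    have hne : s.drop i ≠ [] := by simp only [ne_eq, List.drop_eq_nil_iff]; omega
    rw [pvConvA_eq (s.drop i)]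
    have h1 : (s.drop i).take 1 = [s[i]'h] := by
      rw [List.drop_eq_getElem_cons h]; rfl
    simp [hne, h3, h2, h1, List.drop_drop]
  | case4 i tokens h =>
    have hnil : s.drop i = [] := List.drop_eq_nil_of_le (by omega)
    simp [hnil, pvConvA]

-- ===== VERDICT (by name: the statement is the Claim_ definition above) =====
theorem convert_text_to_list_spec : Claim_equal_convert_text_to_list := by
  intro text _
  unfold Spec_convert_text_to_list convert_text_to_list convert_text_to_list_alt
  rw [pvLoopB_eq]
  simp
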